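-- pv_equiv track=rewrite | github.com/ecly/adventofcode2024 | day12/day12.py | count_disjoint
-- ===== SOURCE A (Python) =====
-- def count_disjoint(ns: list[int]):
--     sections = 0
--     cont: list[int] = []
--     for i in sorted(ns):
--         if not cont:
--             cont.append(i)
--         elif i - cont[-1] == 1:
--             cont.append(i)
--         else:
--             cont = [i]
--             sections += 1
--     if cont:
--         sections += 1
--
--     return sections
-- ===== SOURCE B (Python) =====
-- def count_disjoint(ns: list[int]):
--     present = set(ns)
--     starts = sum(1 for x in present if x - 1 not in present)
--     return starts + (len(ns) - len(present))
-- ===== Notes on version B (the rewrite author's own statement) =====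
-- stated objective: alternative
-- what changed: Replaces the sort-then-linear-scan with a hash-set formulation: count distinct run-starts (x present with x-1 absent) plus one extra section per duplicate occurrence (len(ns) - len(set(ns))); no sorting and no section accumulator loop.
import Mathlib
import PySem

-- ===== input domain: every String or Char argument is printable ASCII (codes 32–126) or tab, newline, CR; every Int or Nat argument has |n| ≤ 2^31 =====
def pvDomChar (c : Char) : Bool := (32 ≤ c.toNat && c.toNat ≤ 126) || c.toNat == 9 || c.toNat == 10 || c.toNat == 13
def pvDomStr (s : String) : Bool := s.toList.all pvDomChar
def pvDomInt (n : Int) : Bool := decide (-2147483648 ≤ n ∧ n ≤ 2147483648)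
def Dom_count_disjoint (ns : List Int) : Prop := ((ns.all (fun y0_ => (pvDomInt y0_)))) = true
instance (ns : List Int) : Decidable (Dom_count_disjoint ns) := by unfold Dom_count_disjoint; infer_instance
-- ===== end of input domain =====

-- B replaces A's sort-then-scan with a hash-set count (run-starts + duplicate extras); proved to return the same value on all inputs.

-- ===== PORT A =====
def count_disjoint (ns : List Int) : Int :=
  let step : Int × List Int → Int → Int × List Int := fun (st : Int × List Int) (i : Int) =>
    if st.2.isEmpty then (st.1, st.2 ++ [i])
    else if i - st.2.getLast! = 1 then (st.1, st.2 ++ [i])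
    else (st.1 + 1, [i])
  let fin := (PySem.List.sorted ns (fun x => x) false).foldl step (0, [])
  if fin.2.isEmpty then fin.1 else fin.1 + 1

-- ===== PORT B =====
def count_disjoint_alt (ns : List Int) : Int :=
  let present : PySem.Set Int := PySem.Set.ofList ns
  let starts : Int := present.countP (fun x => !(PySem.Set.contains present (x - 1)))
  starts + ((ns.length : Int) - (present.length : Int))

-- ===== PRECONDITION & SPEC =====
def Spec_count_disjoint (ns : List Int) (out : Int) : Prop := out = count_disjoint_alt ns
instance (ns : List Int) (out : Int) : Decidable (Spec_count_disjoint ns out) := by unfold Spec_count_disjoint; infer_instance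

-- ===== CLAIM (what is proved, stated in full; the proofs are below) =====
def Claim_equal_count_disjoint : Prop := ∀ (ns : List Int), Dom_count_disjoint ns → Spec_count_disjoint ns (count_disjoint ns)

-- ===== LEMMAS AND PROOFS =====

-- sections added by A's loop after the first element, given the previous element p
def pvBreaks : Int → List Int → Int
  | _, [] => 0
  | p, x :: t => (if x - p = 1 then 0 else 1) + pvBreaks x t

-- A's value characterised on the sorted list
def pvAval : List Int → Int
  | [] => 0
  | a :: t => pvBreaks a t + 1

-- the closed form both sides are reduced to, over the finite set of elements
def pvRhs (l : List Int) : Int :=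
  ((l.toFinset.filter (fun x => x - 1 ∉ l.toFinset)).card : Int)
    + (l.length : Int) - (l.toFinset.card : Int)

lemma pvGetLastBang_eq (c : List Int) : c.getLast! = c.getLast?.getD 0 := by
  cases c with
  | nil => rfl
  | cons a t => simp [List.getLast!, List.getLast?_eq_some_getLast]

lemma pvFold_step (t : List Int) :
    ∀ (s : Int) (c : List Int), c ≠ [] →
      ∃ c', c' ≠ [] ∧
        t.foldl (fun (st : Int × List Int) (i : Int) =>
          if st.2.isEmpty then (st.1, st.2 ++ [i])
          else if i - st.2.getLast! = 1 then (st.1, st.2 ++ [i])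
          else (st.1 + 1, [i])) (s, c) = (s + pvBreaks c.getLast! t, c') := by
  induction t with
  | nil => intro s c hc; exact ⟨c, hc, by simp [pvBreaks]⟩
  | cons x t ih =>
    intro s c hc
    simp only [pvGetLastBang_eq] at ih ⊢
    simp only [List.foldl_cons]
    rw [show (c.isEmpty) = false by simpa [List.isEmpty_iff] using hc]
    simp only [Bool.false_eq_true, if_false]
    by_cases hx : x - c.getLast?.getD 0 = 1
    · obtain ⟨c', hc', hfold⟩ := ih s (c ++ [x]) (by simp)
      refine ⟨c', hc', ?_⟩
      rw [if_pos hx, hfold]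
      simp [pvBreaks, List.getLast?_append, hx]
    · obtain ⟨c', hc', hfold⟩ := ih (s + 1) [x] (by simp)
      refine ⟨c', hc', ?_⟩
      rw [if_neg hx, hfold]
      simp only [pvBreaks, if_neg hx, List.getLast?_singleton, Option.getD_some,
        Prod.mk.injEq, and_true]
      ring

lemma pvA_eq_Aval (ns : List Int) :
    count_disjoint ns = pvAval (PySem.List.sorted ns (fun x => x) false) := by
  unfold count_disjoint
  cases h : PySem.List.sorted ns (fun x => x) false with
  | nil => simp [pvAval]
  | cons a t =>
    simp only [List.foldl_cons, List.isEmpty_nil, if_true, List.nil_append]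
    obtain ⟨c', hc', hfold⟩ := pvFold_step t 0 [a] (by simp)
    rw [hfold]
    have hlast : ([a] : List Int).getLast! = a := by simp [List.getLast!]
    rw [hlast]
    simp [List.isEmpty_iff, hc', pvAval]

lemma pvAval_eq_rhs (l : List Int) (hs : l.Pairwise (· ≤ ·)) : pvAval l = pvRhs l := by
  induction l with
  | nil => simp [pvAval, pvRhs]
  | cons a t ih =>
    have hle : ∀ y ∈ t, a ≤ y := (List.pairwise_cons.mp hs).1
    have hst : t.Pairwise (· ≤ ·) := (List.pairwise_cons.mp hs).2
    cases t with
    | nil =>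
      simp [pvAval, pvBreaks, pvRhs, Finset.filter_singleton, show ¬(a-1=a) by omega]
    | cons b u =>
      have hab : a ≤ b := hle b (by simp)
      have hbu : ∀ y ∈ b :: u, b ≤ y := by
        intro y hy
        rcases List.mem_cons.mp hy with rfl | hy
        · exact le_refl y
        · exact (List.pairwise_cons.mp hst).1 y hy
      have hAstep : pvAval (a :: b :: u) = (if b - a = 1 then 0 else 1) + pvAval (b :: u) := by
        simp [pvAval, pvBreaks]; ring
      by_cases hdup : a = b
      · -- duplicate head: same finset, one more element, one more break
        subst hdup
        have hfs : (a :: a :: u).toFinset = (a :: u).toFinset := by simp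
        have : pvRhs (a :: a :: u) = pvRhs (a :: u) + 1 := by
          simp only [pvRhs, hfs, List.length_cons]
          push_cast; ring
        rw [hAstep, this, ← ih hst, if_neg (show ¬(a - a = 1) by omega)]
        ring
      · -- strictly smaller head: a ∉ t
        have halt : a < b := lt_of_le_of_ne hab hdup
        have hanot : a ∉ (b :: u) := fun h => absurd (hbu a h) (by omega)
        have hfs : (a :: b :: u).toFinset = insert a (b :: u).toFinset := by simp
        set Ft := (b :: u).toFinset with hFt
        have haFt : a ∉ Ft := by simpa [hFt] using hanot
        have hcard : (insert a Ft).card = Ft.card + 1 := Finset.card_insert_of_notMem haFt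
        -- the filtered-set relation
        have hfilter :
            ((insert a Ft).filter (fun x => x - 1 ∉ insert a Ft)).card
              = (Ft.filter (fun x => x - 1 ∉ Ft)).card + (if b - a = 1 then 0 else 1) := by
          have hmemFt : ∀ y ∈ Ft, b ≤ y := by
            intro y hy; exact hbu y (by simpa [hFt, List.mem_toFinset] using hy)
          have ha1 : a - 1 ∉ insert a Ft := by
            simp only [Finset.mem_insert]
            rintro (h | h)
            · omega
            · exact absurd (hmemFt _ h) (by omega)
          by_cases hsucc : b - a = 1
          · -- b = a + 1 : b loses its start status, a gains one
            have hbFt : b ∈ Ft := by simp [hFt]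
            have key : (insert a Ft).filter (fun x => x - 1 ∉ insert a Ft)
                = insert a ((Ft.filter (fun x => x - 1 ∉ Ft)).erase b) := by
              ext x
              simp only [Finset.mem_filter, Finset.mem_insert, Finset.mem_erase]
              constructor
              · rintro ⟨hx | hx, hnx⟩
                · exact Or.inl hx
                · refine Or.inr ⟨fun hxb => ?_, hx, fun h => hnx (Or.inr h)⟩
                  subst hxb; exact hnx (Or.inl (by omega))
              · rintro (hx | ⟨hxb, hx, hnx⟩)
                · subst hx; exact ⟨Or.inl rfl, fun h => ha1 (Finset.mem_insert.mpr h)⟩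
                · refine ⟨Or.inr hx, ?_⟩
                  rintro (h | h)
                  · exact hxb (by omega)
                  · exact hnx h
            have hbstart : b ∈ Ft.filter (fun x => x - 1 ∉ Ft) := by
              refine Finset.mem_filter.mpr ⟨hbFt, fun h => ?_⟩
              exact absurd (hmemFt _ h) (by omega)
            have hanotf : a ∉ (Ft.filter (fun x => x - 1 ∉ Ft)).erase b :=
              fun h => haFt (Finset.mem_filter.mp (Finset.mem_of_mem_erase h)).1
            rw [key, Finset.card_insert_of_notMem hanotf,
                Finset.card_erase_of_mem hbstart, if_pos hsucc]
            have : 1 ≤ (Ft.filter (fun x => x - 1 ∉ Ft)).card :=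
              Finset.card_pos.mpr ⟨b, hbstart⟩
            omega
          · -- gap : nothing changes among t's elements, a is a new start
            have hsuccFt : a + 1 ∉ Ft := by
              intro h; exact absurd (hmemFt _ h) (by omega)
            have key : (insert a Ft).filter (fun x => x - 1 ∉ insert a Ft)
                = insert a (Ft.filter (fun x => x - 1 ∉ Ft)) := by
              ext x
              simp only [Finset.mem_filter, Finset.mem_insert]
              constructor
              · rintro ⟨hx | hx, hnx⟩
                · exact Or.inl hx
                · exact Or.inr ⟨hx, fun h => hnx (Or.inr h)⟩
              · rintro (hx | ⟨hx, hnx⟩)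
                · subst hx; exact ⟨Or.inl rfl, fun h => ha1 (Finset.mem_insert.mpr h)⟩
                · refine ⟨Or.inr hx, ?_⟩
                  rintro (h | h)
                  · exact hsuccFt (by rw [show x = a + 1 by omega] at hx; exact hx)
                  · exact hnx h
            have hanotf : a ∉ Ft.filter (fun x => x - 1 ∉ Ft) :=
              fun h => haFt (Finset.mem_filter.mp h).1
            rw [key, Finset.card_insert_of_notMem hanotf]
            simp [hsucc]
        have hrhs : pvRhs (a :: b :: u) = pvRhs (b :: u) + (if b - a = 1 then 0 else 1) := by
          simp only [pvRhs, hfs, ← hFt, hfilter, hcard, List.length_cons]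
          push_cast; ring
        rw [hAstep, hrhs, ← ih hst]
        ring

-- B's value equals pvRhs (membership/counting facts about PySem.Set.ofList)
lemma pvCountP_ofList (xs : List Int) (p : Int → Bool) :
    (PySem.Set.ofList xs).countP p = (xs.toFinset.filter (fun x => p x = true)).card := by
  rw [List.countP_eq_length_filter]
  have hnd : ((PySem.Set.ofList xs).filter p).Nodup :=
    (PySem.Set.nodup_ofList (xs := xs)).filter p
  rw [← List.toFinset_card_of_nodup hnd]
  congr 1
  ext x
  simp [PySem.Set.mem_ofList, List.mem_toFinset, Finset.mem_filter]

lemma pvLen_ofList (xs : List Int) : (PySem.Set.ofList xs).length = xs.toFinset.card := by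
  rw [← List.toFinset_card_of_nodup (PySem.Set.nodup_ofList (xs := xs))]
  congr 1
  ext x
  simp [PySem.Set.mem_ofList]

lemma pvB_eq_rhs (ns : List Int) : count_disjoint_alt ns = pvRhs ns := by
  unfold count_disjoint_alt pvRhs
  dsimp only
  rw [pvCountP_ofList, pvLen_ofList]
  have hset : (ns.toFinset.filter
        (fun x => (!(PySem.Set.contains (PySem.Set.ofList ns) (x - 1))) = true))
      = ns.toFinset.filter (fun x => x - 1 ∉ ns.toFinset) := by
    ext x
    simp only [Finset.mem_filter, Bool.not_eq_true', ← Bool.not_eq_true,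
      PySem.Set.contains_iff, PySem.Set.mem_ofList, List.mem_toFinset]
  rw [hset]
  ring

lemma pvRhs_perm (l l' : List Int) (h : l.Perm l') : pvRhs l = pvRhs l' := by
  unfold pvRhs
  rw [h.length_eq, List.toFinset_eq_of_perm _ _ h]

-- ===== VERDICT (by name: the statement is the Claim_ definition above) =====
theorem count_disjoint_spec : Claim_equal_count_disjoint := by
  intro ns _
  unfold Spec_count_disjoint
  rw [pvA_eq_Aval, pvB_eq_rhs,
      pvAval_eq_rhs _ (by simpa using PySem.List.sorted_pairwise (xs := ns) (key := fun x => x)),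
      pvRhs_perm _ _ (PySem.List.sorted_perm (xs := ns) (key := fun x => x) (rev := false))]
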